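-- pv_equiv track=rewrite | github.com/kamahen/line-break | line_break_orig.py | distribute_spaces
-- ===== SOURCE A (Python) =====
-- def distribute_spaces(words, D, left_to_right):
--     """words: list of words in line
--     left_to_right: which direction to add blanks
--     Returns: list of lines with blanks inserted
--     """
--
--     if len(words) <= 1:
--         return ' '.join(words)
--
--     # TODO: make this more functional
--     to_distribute = D - len(' '.join(words))
--
--     if left_to_right:
--         i_range = lambda: range(0, len(words) - 1)
--         pad_word = lambda w: w + ' '
--     else:
--         i_range = lambda: range(len(words) - 1, 0, -1)
--         pad_word = lambda w: ' ' + w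
--
--     padded_words = words
--     while to_distribute > 0:
--         for i in i_range():
--             padded_words[i] = pad_word(padded_words[i])
--             to_distribute -= 1
--             if to_distribute <= 0:
--                 break
--     return ' '.join(padded_words)
-- ===== SOURCE B (Python) =====
-- def distribute_spaces(words, D, left_to_right):
--     """words: list of words in line
--     left_to_right: which direction to add blanks
--     Returns: list of lines with blanks inserted
--     """
--     if len(words) <= 1:
--         return ' '.join(words)
--     to_distribute = D - len(' '.join(words))
--     if to_distribute <= 0:
--         return ' '.join(words)
--     gaps = len(words) - 1
--     q, r = divmod(to_distribute, gaps)
--     parts = [words[0]]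
--     for j, w in enumerate(words[1:]):
--         if left_to_right:
--             extra = q + (1 if j < r else 0)
--         else:
--             extra = q + (1 if j >= gaps - r else 0)
--         parts.append(' ' * (1 + extra) + w)
--     return ''.join(parts)
-- ===== Notes on version B (the rewrite author's own statement) =====
-- stated objective: alternative
-- what changed: A distributes the extra blanks one space at a time, round-robin over the gaps, repeatedly rebuilding padded word strings until the budget runs out; B computes each gap's space count once with divmod (quotient to every gap, remainder to the first r gaps left-to-right or the last r gaps right-to-left) and builds the line in a single pass.
import Mathlib
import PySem

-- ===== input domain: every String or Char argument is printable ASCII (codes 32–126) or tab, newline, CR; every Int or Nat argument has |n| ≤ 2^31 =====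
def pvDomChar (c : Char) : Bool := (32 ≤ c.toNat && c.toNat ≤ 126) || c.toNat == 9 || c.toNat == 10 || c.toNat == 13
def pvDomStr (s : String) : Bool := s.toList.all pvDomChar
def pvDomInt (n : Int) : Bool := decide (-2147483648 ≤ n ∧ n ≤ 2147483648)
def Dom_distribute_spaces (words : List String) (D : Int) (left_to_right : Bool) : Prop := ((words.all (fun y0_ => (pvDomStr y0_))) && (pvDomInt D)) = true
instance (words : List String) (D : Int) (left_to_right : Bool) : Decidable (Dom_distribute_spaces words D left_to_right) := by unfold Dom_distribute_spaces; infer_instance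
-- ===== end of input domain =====

-- B replaces A's round-robin one-space-at-a-time loop by a single divmod giving each gap its space
-- count, building the line in one pass.  Return value only: Python A mutates `words` in place
-- (padded_words aliases it); B does not.

-- ===== PORT A =====
-- one traversal of `for i in i_range(): padded_words[i] = pad_word(padded_words[i]); to_distribute -= 1; if to_distribute <= 0: break`
def pvPadPass (pad : String → String) (idxs : List Nat) (pw : List String) (t : Int) : List String × Int :=
  match idxs with
  | [] => (pw, t)
  | i :: rest =>
    let pw' := pw.set i (pad (pw.getD i ""))
    if t - 1 ≤ 0 then (pw', t - 1) else pvPadPass pad rest pw' (t - 1)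

-- termination helper for the while loop (cited by pvWhile's decreasing_by):
-- a pass over a nonempty index list strictly decreases to_distribute
theorem pvPadPass_snd_le (pad : String → String) (idxs : List Nat) (pw : List String) (t : Int)
    (h : idxs ≠ []) : (pvPadPass pad idxs pw t).2 ≤ t - 1 := by
  induction idxs generalizing pw t with
  | nil => exact absurd rfl h
  | cons i rest ih =>
    simp only [pvPadPass]
    split
    · simp
    · cases rest with
      | nil => simp [pvPadPass]
      | cons j rest' =>
        have := ih (pw.set i (pad (pw.getD i ""))) (t - 1) (by simp)
        omega

-- `while to_distribute > 0: for i in i_range(): ...`  (the `idxs ≠ []` conjunct only makes the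
-- recursion total; at the call site words has ≥ 2 elements so idxs is never empty)
def pvWhile (pad : String → String) (idxs : List Nat) (pw : List String) (t : Int) : List String :=
  if h : 0 < t ∧ idxs ≠ [] then
    pvWhile pad idxs (pvPadPass pad idxs pw t).1 (pvPadPass pad idxs pw t).2
  else pw
termination_by t.toNat
decreasing_by
  have := pvPadPass_snd_le pad idxs pw t h.2
  omega

def distribute_spaces (words : List String) (D : Int) (left_to_right : Bool) : String :=
  if words.length ≤ 1 then PySem.Str.join " " words
  else
    let to_distribute := D - PySem.Str.len (PySem.Str.join " " words)
    let idxs := if left_to_right then List.range (words.length - 1) else (List.range' 1 (words.length - 1)).reverse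
    let pad := if left_to_right then (fun w => w ++ " ") else (fun w => " " ++ w)
    PySem.Str.join " " (pvWhile pad idxs words to_distribute)

-- ===== PORT B =====
def pvSpaces (k : Nat) : String := String.ofList (List.replicate k ' ')   -- ' ' * k

def distribute_spaces_alt (words : List String) (D : Int) (left_to_right : Bool) : String :=
  if words.length ≤ 1 then PySem.Str.join " " words
  else
    let to_distribute := D - PySem.Str.len (PySem.Str.join " " words)
    if to_distribute ≤ 0 then PySem.Str.join " " words
    else
      let gaps : Int := (words.length : Int) - 1
      let q := PySem.Int.floordiv to_distribute gaps
      let r := PySem.Int.mod to_distribute gaps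
      let parts := (words.getD 0 "") ::
        (PySem.List.enumerate (words.drop 1) 0).map (fun jw =>
          let extra := if left_to_right then q + (if jw.1 < r then 1 else 0)
                       else q + (if jw.1 ≥ gaps - r then 1 else 0)
          pvSpaces (1 + extra).toNat ++ jw.2)
      PySem.Str.join "" parts

-- ===== PRECONDITION & SPEC =====
def Spec_distribute_spaces (words : List String) (D : Int) (left_to_right : Bool) (out : String) : Prop := out = distribute_spaces_alt words D left_to_right
instance (words : List String) (D : Int) (left_to_right : Bool) (out : String) : Decidable (Spec_distribute_spaces words D left_to_right out) := by unfold Spec_distribute_spaces; infer_instance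

-- ===== CLAIM (what is proved, stated in full; the proofs are below) =====
def Claim_equal_distribute_spaces : Prop := ∀ (words : List String) (D : Int) (left_to_right : Bool), Dom_distribute_spaces words D left_to_right → Spec_distribute_spaces words D left_to_right (distribute_spaces words D left_to_right)

-- ===== LEMMAS AND PROOFS =====
-- one full 'for' pass without the break: set each index of idxs once, in order
def pvPadAll (pad : String → String) (idxs : List Nat) (pw : List String) : List String :=
  idxs.foldl (fun l i => l.set i (pad (l.getD i ""))) pw

theorem pvPadPass_big (pad : String → String) (idxs : List Nat) (pw : List String) (t : Int)
    (h : (idxs.length : Int) ≤ t) :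
    pvPadPass pad idxs pw t = (pvPadAll pad idxs pw, t - idxs.length) := by
  induction idxs generalizing pw t with
  | nil => simp [pvPadPass, pvPadAll]
  | cons i rest ih =>
    simp only [pvPadPass, pvPadAll, List.foldl_cons, List.length_cons] at *
    split
    · have hr : rest = [] := by
        cases rest with
        | nil => rfl
        | cons a b => simp at h; omega
      subst hr
      simp [pvPadAll] at *
    · rw [ih _ (t - 1) (by omega)]
      refine Prod.ext rfl ?_
      simp
      omega

theorem pvPadPass_small (pad : String → String) (idxs : List Nat) (pw : List String) (t : Int)
    (h1 : 0 < t) (h2 : t ≤ (idxs.length : Int)) :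
    pvPadPass pad idxs pw t = (pvPadAll pad (idxs.take t.toNat) pw, 0) := by
  induction idxs generalizing pw t with
  | nil => simp at h2; omega
  | cons i rest ih =>
    simp only [pvPadPass]
    split
    · have ht : t = 1 := by omega
      subst ht
      simp [pvPadAll]
    · rw [ih _ (t - 1) (by omega) (by simp at h2 ⊢; omega)]
      have : t.toNat = (t - 1).toNat + 1 := by omega
      rw [this]
      simp [pvPadAll]

-- the while loop = (tn / gaps) full passes followed by a partial pass over the first tn % gaps indices
theorem pvWhile_eq (pad : String → String) (idxs : List Nat) (hne : idxs ≠ []) :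
    ∀ (tn : Nat) (pw : List String), 0 < tn →
    pvWhile pad idxs pw (tn : Int) =
      pvPadAll pad (idxs.take (tn % idxs.length)) ((pvPadAll pad idxs)^[tn / idxs.length] pw) := by
  intro tn
  induction tn using Nat.strong_induction_on with
  | _ tn ih =>
    intro pw htn
    have hg : 0 < idxs.length := List.length_pos_iff.mpr hne
    rw [pvWhile]
    rw [dif_pos ⟨by exact_mod_cast htn, hne⟩]
    by_cases hle : tn ≤ idxs.length
    · rw [pvPadPass_small pad idxs pw tn (by exact_mod_cast htn) (by exact_mod_cast hle)]
      simp only [Int.toNat_natCast]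
      rw [pvWhile, dif_neg (by simp)]
      rcases Nat.lt_or_ge tn idxs.length with hlt | hge
      · rw [Nat.mod_eq_of_lt hlt, Nat.div_eq_of_lt hlt]
        simp
      · have heq : tn = idxs.length := le_antisymm hle hge
        subst heq
        simp [Nat.mod_self, Nat.div_self hg, pvPadAll]
    · push_neg at hle
      rw [pvPadPass_big pad idxs pw tn (by exact_mod_cast hle.le)]
      have hc : ((tn : Int) - idxs.length) = ((tn - idxs.length : Nat) : Int) := by omega
      rw [hc, ih (tn - idxs.length) (by omega) _ (by omega)]
      rw [← Nat.mod_eq_sub_mod hle.le]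
      rw [Nat.div_eq_sub_div hg hle.le]
      simp [Function.iterate_succ_apply]

-- a full pass pads exactly the positions listed in idxs (idxs has no duplicates)
theorem pvPadAll_getElem? (pad : String → String) (idxs : List Nat) (hnd : idxs.Nodup)
    (pw : List String) (j : Nat) :
    (pvPadAll pad idxs pw)[j]? = if j ∈ idxs then pw[j]?.map pad else pw[j]? := by
  induction idxs generalizing pw with
  | nil => simp [pvPadAll]
  | cons i rest ih =>
    have hnr : rest.Nodup := hnd.of_cons
    have hni : i ∉ rest := (List.nodup_cons.mp hnd).1
    have : pvPadAll pad (i :: rest) pw = pvPadAll pad rest (pw.set i (pad (pw.getD i ""))) := rfl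
    rw [this, ih hnr]
    by_cases hji : j = i
    · subst hji
      rw [if_neg hni, if_pos (show j ∈ j :: rest by simp)]
      by_cases hlen : j < pw.length
      · simp [List.getElem?_set, hlen, List.getD_eq_getElem?_getD, List.getElem?_eq_getElem hlen]
      · have hlen' : pw.length ≤ j := Nat.le_of_not_lt hlen
        rw [List.getElem?_eq_none (by simpa using hlen'), List.getElem?_eq_none (by simpa using hlen')]
        rfl
    · rw [List.getElem?_set_ne (fun h => hji h.symm)]
      simp [List.mem_cons, hji]

theorem pvPadAll_iterate_getElem? (pad : String → String) (idxs : List Nat) (hnd : idxs.Nodup)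
    (k : Nat) (pw : List String) (j : Nat) :
    ((pvPadAll pad idxs)^[k] pw)[j]? = if j ∈ idxs then pw[j]?.map (pad^[k]) else pw[j]? := by
  induction k generalizing pw with
  | zero => simp
  | succ k ihk =>
    rw [Function.iterate_succ_apply, ihk, pvPadAll_getElem? pad idxs hnd]
    by_cases hj : j ∈ idxs
    · simp [hj, Function.iterate_succ_apply, Option.map_map]
    · simp [hj]

theorem pvWhile_getElem? (pad : String → String) (idxs : List Nat) (hne : idxs ≠ [])
    (hnd : idxs.Nodup) (tn : Nat) (h : 0 < tn) (pw : List String) (j : Nat) :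
    (pvWhile pad idxs pw (tn : Int))[j]? =
      pw[j]?.map (pad^[(if j ∈ idxs then tn / idxs.length else 0) +
                       (if j ∈ idxs.take (tn % idxs.length) then 1 else 0)]) := by
  rw [pvWhile_eq pad idxs hne tn pw h]
  rw [pvPadAll_getElem? pad _ (hnd.sublist (List.take_sublist _ _)),
      pvPadAll_iterate_getElem? pad idxs hnd]
  by_cases ht : j ∈ idxs.take (tn % idxs.length)
  · have hj : j ∈ idxs := List.mem_of_mem_take ht
    simp [ht, hj, Option.map_map, ← Function.iterate_succ']
  · by_cases hj : j ∈ idxs <;> simp [ht, hj]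

theorem pvPadLeft_iterate (k : Nat) (w : String) : (fun w => w ++ " ")^[k] w = w ++ pvSpaces k := by
  induction k generalizing w with
  | zero =>
    apply String.toList_inj.mp
    simp [pvSpaces]
  | succ k ih =>
    rw [Function.iterate_succ_apply, ih]
    apply String.toList_inj.mp
    simp [pvSpaces, String.toList_append, List.replicate_succ]

theorem pvPadRight_iterate (k : Nat) (w : String) : (fun w => " " ++ w)^[k] w = pvSpaces k ++ w := by
  induction k generalizing w with
  | zero =>
    apply String.toList_inj.mp
    simp [pvSpaces]
  | succ k ih =>
    rw [Function.iterate_succ_apply', ih]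
    apply String.toList_inj.mp
    simp [pvSpaces, String.toList_append, List.replicate_succ]

-- A's final word list, left-to-right: the first cs.length words each get their pad appended

-- A's final word list, left-to-right: the first cs.length words each get their pad appended
def pvBuildL (cs : List Nat) (ws : List String) : List String :=
  match cs, ws with
  | c :: cs, w :: ws => (w ++ pvSpaces c) :: pvBuildL cs ws
  | _, ws => ws

-- tail of B's parts: each tail word gets (1 + count) spaces in front

-- tail of B's parts list: each tail word gets (1 + count) spaces in front
def pvBuildB (cs : List Nat) (ws : List String) : List String :=
  match cs, ws with
  | c :: cs, w :: ws => (pvSpaces (1 + c) ++ w) :: pvBuildB cs ws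
  | _, _ => []

-- tail of A's final word list, right-to-left: each tail word gets its pads in front

-- tail of A's final word list, right-to-left: each tail word gets its pads in front
def pvBuildRA (cs : List Nat) (ws : List String) : List String :=
  match cs, ws with
  | c :: cs, w :: ws => (pvSpaces c ++ w) :: pvBuildRA cs ws
  | _, _ => []

theorem pvBuildL_getElem? (cs : List Nat) (ws : List String) (j : Nat) :
    (pvBuildL cs ws)[j]? = match cs[j]? with
      | some c => ws[j]?.map (· ++ pvSpaces c)
      | none => ws[j]? := by
  induction cs generalizing ws j with
  | nil => simp [pvBuildL]
  | cons c cs ih =>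
    cases ws with
    | nil =>
      cases j with
      | zero => simp [pvBuildL]
      | succ j =>
        show (([] : List String))[j+1]? = _
        rw [List.getElem?_cons_succ]
        cases h : cs[j]? <;> simp [h]
    | cons w ws =>
      cases j with
      | zero => simp [pvBuildL]
      | succ j => simpa [pvBuildL] using ih ws j

theorem pvBuildB_getElem? (cs : List Nat) (ws : List String) (hl : ws.length ≤ cs.length) (j : Nat) :
    (pvBuildB cs ws)[j]? = ws[j]?.map (fun w => match cs[j]? with
      | some c => pvSpaces (1 + c) ++ w
      | none => w) := by
  induction cs generalizing ws j with
  | nil =>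
    have : ws = [] := List.length_eq_zero_iff.mp (Nat.le_zero.mp (by simpa using hl))
    subst this; simp [pvBuildB]
  | cons c cs ih =>
    cases ws with
    | nil => simp [pvBuildB]
    | cons w ws =>
      cases j with
      | zero => simp [pvBuildB]
      | succ j => simpa [pvBuildB] using ih ws (by simpa using hl) j

theorem pvBuildRA_getElem? (cs : List Nat) (ws : List String) (hl : ws.length ≤ cs.length) (j : Nat) :
    (pvBuildRA cs ws)[j]? = ws[j]?.map (fun w => match cs[j]? with
      | some c => pvSpaces c ++ w
      | none => w) := by
  induction cs generalizing ws j with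
  | nil =>
    have : ws = [] := List.length_eq_zero_iff.mp (Nat.le_zero.mp (by simpa using hl))
    subst this; simp [pvBuildRA]
  | cons c cs ih =>
    cases ws with
    | nil => simp [pvBuildRA]
    | cons w ws =>
      cases j with
      | zero => simp [pvBuildRA]
      | succ j => simpa [pvBuildRA] using ih ws (by simpa using hl) j

theorem pvJoin_cons_of_ne_nil (sep x : List Char) (l : List (List Char)) (h : l ≠ []) :
    PySem.Chars.join sep (x :: l) = x ++ sep ++ PySem.Chars.join sep l := by
  cases l with
  | nil => exact absurd rfl h
  | cons y a => exact PySem.Chars.join_cons_cons sep x y a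

theorem pvJoin_nil_cons (x : List Char) (l : List (List Char)) :
    PySem.Chars.join [] (x :: l) = x ++ PySem.Chars.join [] l := by
  cases l with
  | nil => simp [PySem.Chars.join_singleton, PySem.Chars.join_nil]
  | cons y a => simp [PySem.Chars.join_cons_cons]

theorem pvBuildL_ne_nil (cs : List Nat) (w : String) (ws : List String) :
    pvBuildL cs (w :: ws) ≠ [] := by
  cases cs <;> simp [pvBuildL]

-- the crux, left-to-right: join-with-' ' of the pad-appended words equals join-of-'' of B's parts

-- the crux, left-to-right: ' '-join of the pad-appended words = ''-join of B's parts
theorem pvJoinL (cs : List Nat) (ws : List String) (w : String) (h : cs.length = ws.length) :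
    PySem.Chars.join [' '] ((pvBuildL cs (w :: ws)).map String.toList) =
    PySem.Chars.join [] ((w :: pvBuildB cs ws).map String.toList) := by
  induction cs generalizing w ws with
  | nil =>
    have : ws = [] := List.length_eq_zero_iff.mp h.symm
    subst this
    simp [pvBuildL, pvBuildB, PySem.Chars.join_singleton]
  | cons c cs ih =>
    cases ws with
    | nil => simp at h
    | cons w' ws' =>
      have h' : cs.length = ws'.length := by simpa using h
      show PySem.Chars.join [' '] (((w ++ pvSpaces c) :: pvBuildL cs (w' :: ws')).map String.toList) = _
      rw [List.map_cons, pvJoin_cons_of_ne_nil _ _ _ (by simpa using pvBuildL_ne_nil cs w' ws')]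
      rw [ih ws' w' h']
      show _ = PySem.Chars.join [] ((w :: (pvSpaces (1 + c) ++ w') :: pvBuildB cs ws').map String.toList)
      rw [List.map_cons, List.map_cons, pvJoin_nil_cons, pvJoin_nil_cons, Nat.add_comm 1 c]
      simp [pvSpaces, String.toList_append, List.replicate_succ', List.append_assoc, pvJoin_nil_cons]

-- the crux, right-to-left: join-with-' ' of the pad-prefixed words equals join-of-'' of B's parts

-- the crux, right-to-left: ' '-join of the pad-prefixed words = ''-join of B's parts
theorem pvJoinR (cs : List Nat) (ws : List String) (w : String) (h : cs.length = ws.length) :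
    PySem.Chars.join [' '] ((w :: pvBuildRA cs ws).map String.toList) =
    PySem.Chars.join [] ((w :: pvBuildB cs ws).map String.toList) := by
  induction ws generalizing w cs with
  | nil =>
    have : cs = [] := List.length_eq_zero_iff.mp h
    subst this
    simp [pvBuildRA, pvBuildB, PySem.Chars.join_singleton]
  | cons w' ws' ih =>
    cases cs with
    | nil => simp at h
    | cons c cs' =>
      have h' : cs'.length = ws'.length := by simpa using h
      show PySem.Chars.join [' '] ((w :: (pvSpaces c ++ w') :: pvBuildRA cs' ws').map String.toList) = _
      rw [List.map_cons, pvJoin_cons_of_ne_nil _ _ _ (by simp)]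
      rw [ih cs' (pvSpaces c ++ w') h']
      show _ = PySem.Chars.join [] ((w :: (pvSpaces (1 + c) ++ w') :: pvBuildB cs' ws').map String.toList)
      rw [List.map_cons, List.map_cons, List.map_cons, pvJoin_nil_cons, pvJoin_nil_cons, pvJoin_nil_cons,
          Nat.add_comm 1 c]
      simp [pvSpaces, String.toList_append, List.replicate_succ, List.append_assoc]

-- left-to-right: final word list of A's loop in closed form

-- left-to-right: final word list of A's loop in closed form
theorem pvShapeL (w : String) (ws : List String) (hg : 0 < ws.length) (tn : Nat) (htn : 0 < tn) :
    pvWhile (fun w => w ++ " ") (List.range ws.length) (w :: ws) (tn : Int)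
      = pvBuildL ((List.range ws.length).map
          (fun j => tn / ws.length + if j < tn % ws.length then 1 else 0)) (w :: ws) := by
  set g := ws.length with hgdef
  have hr : tn % g < g := Nat.mod_lt tn hg
  apply List.ext_getElem?
  intro j
  rw [pvWhile_getElem? _ _ (by simp [List.range_eq_nil]; omega) (List.nodup_range) tn htn]
  rw [pvBuildL_getElem?, List.getElem?_map, List.length_range, List.take_range, Nat.min_eq_left hr.le]
  by_cases hj : j < g
  · rw [List.getElem?_range hj]
    simp only [List.mem_range, hj, if_true]
    cases hx : (w :: ws)[j]? with
    | none => rfl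
    | some x =>
      simp only [Option.map_some]
      rw [pvPadLeft_iterate]
  · have h1 : (List.range g)[j]? = none := by
      rw [List.getElem?_eq_none] <;> simpa using hj
    rw [h1]
    have hjr : ¬ j < tn % g := by omega
    simp [List.mem_range, hj, hjr]

-- right-to-left: final word list of A's loop in closed form

-- right-to-left: final word list of A's loop in closed form
theorem pvShapeR (w : String) (ws : List String) (hg : 0 < ws.length) (tn : Nat) (htn : 0 < tn) :
    pvWhile (fun w => " " ++ w) ((List.range' 1 ws.length).reverse) (w :: ws) (tn : Int)
      = w :: pvBuildRA ((List.range ws.length).map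
          (fun k => tn / ws.length + if ws.length - tn % ws.length ≤ k then 1 else 0)) ws := by
  set g := ws.length with hgdef
  have hr : tn % g < g := Nat.mod_lt tn hg
  have hlen : ((List.range' 1 g).reverse).length = g := by simp [List.length_range']
  have hne : (List.range' 1 g).reverse ≠ [] := List.ne_nil_of_length_pos (by rw [hlen]; exact hg)
  have hnd : ((List.range' 1 g).reverse).Nodup := List.nodup_reverse.mpr List.nodup_range'
  have htake : ((List.range' 1 g).reverse).take (tn % g)
      = (List.range' (1 + (g - tn % g)) (g - (g - tn % g))).reverse := by
    simp [List.take_reverse, List.length_range', List.drop_range']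
  have hmem : ∀ j : Nat, (j ∈ (List.range' 1 g).reverse ↔ 1 ≤ j ∧ j < 1 + g) := by
    intro j; rw [List.mem_reverse, List.mem_range'_1]
  have hmemt : ∀ j : Nat, (j ∈ ((List.range' 1 g).reverse).take (tn % g)
      ↔ 1 + (g - tn % g) ≤ j ∧ j < 1 + (g - tn % g) + (g - (g - tn % g))) := by
    intro j; rw [htake, List.mem_reverse, List.mem_range'_1]
  apply List.ext_getElem?
  intro j
  rw [pvWhile_getElem? _ _ hne hnd tn htn, hlen]
  cases j with
  | zero =>
    have h1 : ¬ (0 ∈ (List.range' 1 g).reverse) := by rw [hmem]; omega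
    have h2 : ¬ (0 ∈ ((List.range' 1 g).reverse).take (tn % g)) := by rw [hmemt]; omega
    simp [h1, h2]
  | succ k =>
    rw [List.getElem?_cons_succ, List.getElem?_cons_succ,
        pvBuildRA_getElem? _ _ (by simp [hgdef]), List.getElem?_map]
    by_cases hk : k < g
    · rw [List.getElem?_range hk]
      cases hx : ws[k]? with
      | none => rfl
      | some x =>
        simp only [Option.map_some]
        have hin : k + 1 ∈ (List.range' 1 g).reverse := (hmem (k+1)).mpr (by omega)
        rw [if_pos hin]
        by_cases hit : k + 1 ∈ ((List.range' 1 g).reverse).take (tn % g)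
        · rw [if_pos hit, pvPadRight_iterate]
          have hgr : g - tn % g ≤ k := by have := (hmemt (k+1)).mp hit; omega
          simp [hgr]
        · rw [if_neg hit, pvPadRight_iterate]
          have hgr : ¬ (g - tn % g ≤ k) := by
            intro hc
            exact hit ((hmemt (k+1)).mpr (by omega))
          simp [hgr]
    · have h1 : ws[k]? = none := by rw [List.getElem?_eq_none]; omega
      simp [h1]

-- tail of B's parts list, left-to-right, as pvBuildB over Nat counts
theorem pvPartsL (ws : List String) (tn : Nat) (hg : 0 < ws.length) :
    (PySem.List.enumerate ws 0).map (fun jw =>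
        pvSpaces (1 + (PySem.Int.floordiv (tn : Int) (ws.length : Int)
          + if jw.1 < PySem.Int.mod (tn : Int) (ws.length : Int) then 1 else 0)).toNat ++ jw.2)
      = pvBuildB ((List.range ws.length).map
          (fun j => tn / ws.length + if j < tn % ws.length then 1 else 0)) ws := by
  apply List.ext_getElem?
  intro k
  rw [List.getElem?_map, PySem.List.getElem?_enumerate, pvBuildB_getElem? _ _ (by simp),
      List.getElem?_map]
  by_cases hk : k < ws.length
  · rw [List.getElem?_range hk]
    cases hx : ws[k]? with
    | none => rfl
    | some x =>
      simp only [Option.map_some]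
      have harg : (1 + (PySem.Int.floordiv (tn : Int) (ws.length : Int)
          + if ((0 : Int) + k) < PySem.Int.mod (tn : Int) (ws.length : Int) then 1 else 0)).toNat
          = 1 + (tn / ws.length + if k < tn % ws.length then 1 else 0) := by
        rw [PySem.Int.floordiv_natCast, PySem.Int.mod_natCast]
        generalize tn / ws.length = a
        generalize hb : tn % ws.length = b
        split_ifs with h h' h' <;> omega
      rw [harg]
  · have hnone : ws[k]? = none := by rw [List.getElem?_eq_none]; omega
    simp [hnone]

-- tail of B's parts list, right-to-left, as pvBuildB over Nat counts
theorem pvPartsR (ws : List String) (tn : Nat) (hg : 0 < ws.length) :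
    (PySem.List.enumerate ws 0).map (fun jw =>
        pvSpaces (1 + (PySem.Int.floordiv (tn : Int) (ws.length : Int)
          + if jw.1 ≥ (ws.length : Int) - PySem.Int.mod (tn : Int) (ws.length : Int) then 1 else 0)).toNat ++ jw.2)
      = pvBuildB ((List.range ws.length).map
          (fun k => tn / ws.length + if ws.length - tn % ws.length ≤ k then 1 else 0)) ws := by
  have hr : tn % ws.length < ws.length := Nat.mod_lt tn hg
  apply List.ext_getElem?
  intro k
  rw [List.getElem?_map, PySem.List.getElem?_enumerate, pvBuildB_getElem? _ _ (by simp),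
      List.getElem?_map]
  by_cases hk : k < ws.length
  · rw [List.getElem?_range hk]
    cases hx : ws[k]? with
    | none => rfl
    | some x =>
      simp only [Option.map_some]
      have harg : (1 + (PySem.Int.floordiv (tn : Int) (ws.length : Int)
          + if ((0 : Int) + k) ≥ (ws.length : Int) - PySem.Int.mod (tn : Int) (ws.length : Int) then 1 else 0)).toNat
          = 1 + (tn / ws.length + if ws.length - tn % ws.length ≤ k then 1 else 0) := by
        rw [PySem.Int.floordiv_natCast, PySem.Int.mod_natCast]
        generalize tn / ws.length = a
        generalize hb : tn % ws.length = b at hr ⊢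
        split_ifs with h h' h' <;> omega
      rw [harg]
  · have hnone : ws[k]? = none := by rw [List.getElem?_eq_none]; omega
    simp [hnone]

theorem pvFinL (cs : List Nat) (ws : List String) (w : String) (h : cs.length = ws.length) :
    PySem.Str.join " " (pvBuildL cs (w :: ws)) = PySem.Str.join "" (w :: pvBuildB cs ws) := by
  apply String.toList_inj.mp
  have := pvJoinL cs ws w h
  simpa using this

theorem pvFinR (cs : List Nat) (ws : List String) (w : String) (h : cs.length = ws.length) :
    PySem.Str.join " " (w :: pvBuildRA cs ws) = PySem.Str.join "" (w :: pvBuildB cs ws) := by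
  apply String.toList_inj.mp
  have := pvJoinR cs ws w h
  simpa using this

-- the assembled equivalence
theorem pv_main (words : List String) (D : Int) (left_to_right : Bool) :
    distribute_spaces words D left_to_right = distribute_spaces_alt words D left_to_right := by
  by_cases h1 : words.length ≤ 1
  · rw [distribute_spaces, distribute_spaces_alt, if_pos h1, if_pos h1]
  · cases words with
    | nil => simp at h1
    | cons w ws =>
      have hg : 0 < ws.length := by rw [List.length_cons] at h1; omega
      rw [distribute_spaces, distribute_spaces_alt, if_neg h1, if_neg h1]
      simp only []
      set t := D - PySem.Str.len (PySem.Str.join " " (w :: ws)) with htdef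
      by_cases h0 : t ≤ 0
      · rw [if_pos h0, pvWhile]
        have hnt : ¬ (0 < t) := not_lt.mpr h0
        simp [hnt]
      · rw [if_neg h0]
        have htn0 : 0 < t.toNat := by omega
        have htcast : t = ((t.toNat : Nat) : Int) := by omega
        have hlen1 : (w :: ws).length - 1 = ws.length := by simp
        have hlenc : ((w :: ws).length : Int) - 1 = (ws.length : Int) := by
          simp only [List.length_cons]
          push_cast
          ring
        rw [htcast, hlen1, hlenc]
        cases left_to_right with
        | true =>
          simp only [if_true, eq_self_iff_true, List.getD_cons_zero, List.drop_one, List.tail_cons]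
          rw [pvShapeL w ws hg t.toNat htn0, pvPartsL ws t.toNat hg]
          exact pvFinL _ ws w (by simp)
        | false =>
          simp only [Bool.false_eq_true, if_false, List.getD_cons_zero, List.drop_one, List.tail_cons]
          rw [pvShapeR w ws hg t.toNat htn0, pvPartsR ws t.toNat hg]
          exact pvFinR _ ws w (by simp)

-- ===== VERDICT (by name: the statement is the Claim_ definition above) =====
theorem distribute_spaces_spec : Claim_equal_distribute_spaces := by
  intro words D left_to_right _
  exact pv_main words D left_to_right
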